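-- pv_equiv track=rewrite | github.com/981377660LMT/algorithm-study | 22_专题/前缀与差分/差分数组/离散化/D - A Piece of Cake-二维离散化.py | aPieceOfCake
-- ===== SOURCE A (Python) =====
-- from bisect import bisect_left
-- from collections import defaultdict
-- from typing import Tuple, List
--
-- INF = int(1e18)
--
-- def aPieceOfCake(
--     ROW: int, COL: int, positions: List[Tuple[int, int]], rowCuts: List[int], colCuts: List[int]
-- ) -> Tuple[int, int]:
--     def getId(x: int, y: int) -> int:
--         """求草莓离散化后的坐标."""
--         posX = bisect_left(rowCuts, x)
--         posY = bisect_left(colCuts, y)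
--         return posX * (COL + 1) + posY
--
--     rowCuts = sorted(rowCuts)
--     colCuts = sorted(colCuts)
--     counter = defaultdict(int)
--     for x, y in positions:
--         counter[getId(x, y)] += 1
--
--     min_, max_ = INF, 0
--     for v in counter.values():
--         min_ = min(min_, v)
--         max_ = max(max_, v)
--     if len(counter) < (len(rowCuts) + 1) * (len(colCuts) + 1):
--         min_ = 0
--
--     return min_, max_
-- ===== SOURCE B (Python) =====
-- from bisect import bisect_left
-- from typing import Tuple, List
--
-- INF = int(1e18)
--
-- def aPieceOfCake(
--     ROW: int, COL: int, positions: List[Tuple[int, int]], rowCuts: List[int], colCuts: List[int]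
-- ) -> Tuple[int, int]:
--     rowCuts = sorted(rowCuts)
--     colCuts = sorted(colCuts)
--     # sort the cell ids: equal ids become adjacent runs, so no hash counter is needed
--     ids = sorted(
--         bisect_left(rowCuts, x) * (COL + 1) + bisect_left(colCuts, y) for x, y in positions
--     )
--     runs = []          # run lengths of consecutive equal ids = per-cell strawberry counts
--     cur, cnt = 0, 0
--     for v in ids:
--         if cnt != 0 and v == cur:
--             cnt += 1
--         else:
--             if cnt != 0:
--                 runs.append(cnt)
--             cur, cnt = v, 1
--     if cnt != 0:
--         runs.append(cnt)
--
--     min_, max_ = INF, 0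
--     for c in runs:
--         min_ = min(min_, c)
--         max_ = max(max_, c)
--     if len(runs) < (len(rowCuts) + 1) * (len(colCuts) + 1):
--         min_ = 0
--     return min_, max_
-- ===== Notes on version B (the rewrite author's own statement) =====
-- stated objective: alternative
-- what changed: B drops A's defaultdict counter entirely: it sorts the discretized cell ids so equal cells become adjacent, then one linear scan over the sorted ids collects run lengths (the per-cell counts) and the number of runs (the number of non-empty cells), from which min/max are taken as in A.
import Mathlib
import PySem

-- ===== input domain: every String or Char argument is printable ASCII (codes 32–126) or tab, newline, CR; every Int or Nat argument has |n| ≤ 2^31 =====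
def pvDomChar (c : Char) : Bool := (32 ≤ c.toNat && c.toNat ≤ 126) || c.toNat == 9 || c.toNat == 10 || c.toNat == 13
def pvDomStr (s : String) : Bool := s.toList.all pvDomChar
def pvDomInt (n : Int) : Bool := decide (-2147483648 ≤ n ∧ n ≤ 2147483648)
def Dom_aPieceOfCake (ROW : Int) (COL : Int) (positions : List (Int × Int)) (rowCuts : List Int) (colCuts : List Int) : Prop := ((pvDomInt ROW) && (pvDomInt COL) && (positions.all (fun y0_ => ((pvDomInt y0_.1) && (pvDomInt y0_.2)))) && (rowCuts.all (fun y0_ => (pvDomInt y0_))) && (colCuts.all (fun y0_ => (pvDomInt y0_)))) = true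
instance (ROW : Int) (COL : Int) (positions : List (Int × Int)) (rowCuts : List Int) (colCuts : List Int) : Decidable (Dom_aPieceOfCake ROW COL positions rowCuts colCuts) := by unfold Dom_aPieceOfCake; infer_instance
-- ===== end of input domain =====

-- B replaces A's hash-counter over cell ids by sort-the-ids-then-scan-runs (same results, a different algorithm); equivalence of the return values is proved for all inputs.

-- ===== PORT A =====
def aPieceOfCake (ROW : Int) (COL : Int) (positions : List (Int × Int)) (rowCuts : List Int) (colCuts : List Int) : Int × Int :=
  let rc := PySem.List.sorted rowCuts (fun v => v)
  let cc := PySem.List.sorted colCuts (fun v => v)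
  let getId := fun (x y : Int) =>
    ((PySem.List.bisectLeft rc x : Int)) * (COL + 1) + ((PySem.List.bisectLeft cc y : Int))
  let counter := positions.foldl
    (fun d p => d.modify (getId p.1 p.2) 0 (· + 1)) (PySem.Dict.empty : PySem.Dict Int Int)
  let mm := counter.values.foldl
    (fun (s : Int × Int) v => (min s.1 v, max s.2 v)) ((1000000000000000000 : Int), (0 : Int))
  let min_ := if (counter.size : Int) < ((rc.length : Int) + 1) * ((cc.length : Int) + 1) then (0 : Int) else mm.1
  (min_, mm.2)

-- ===== PORT B =====
-- the run-length scan of Source B: state (cur, cnt, runs), flushed once after the loop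
def pvRunLens (ids : List Int) : List Int :=
  let st := ids.foldl
    (fun (st : Int × Int × List Int) v =>
      if st.2.1 ≠ 0 ∧ v = st.1 then (st.1, st.2.1 + 1, st.2.2)
      else (v, 1, if st.2.1 ≠ 0 then st.2.2 ++ [st.2.1] else st.2.2))
    ((0 : Int), (0 : Int), ([] : List Int))
  if st.2.1 ≠ 0 then st.2.2 ++ [st.2.1] else st.2.2

def aPieceOfCake_alt (ROW : Int) (COL : Int) (positions : List (Int × Int)) (rowCuts : List Int) (colCuts : List Int) : Int × Int :=
  let rc := PySem.List.sorted rowCuts (fun v => v)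
  let cc := PySem.List.sorted colCuts (fun v => v)
  let ids := PySem.List.sorted
    (positions.map (fun p =>
      ((PySem.List.bisectLeft rc p.1 : Int)) * (COL + 1) + ((PySem.List.bisectLeft cc p.2 : Int))))
    (fun v => v)
  let runs := pvRunLens ids
  let mm := runs.foldl
    (fun (s : Int × Int) v => (min s.1 v, max s.2 v)) ((1000000000000000000 : Int), (0 : Int))
  let min_ := if (runs.length : Int) < ((rc.length : Int) + 1) * ((cc.length : Int) + 1) then (0 : Int) else mm.1
  (min_, mm.2)

-- ===== PRECONDITION & SPEC =====
def Spec_aPieceOfCake (ROW : Int) (COL : Int) (positions : List (Int × Int)) (rowCuts : List Int) (colCuts : List Int) (out : Int × Int) : Prop := out = aPieceOfCake_alt ROW COL positions rowCuts colCuts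
instance (ROW : Int) (COL : Int) (positions : List (Int × Int)) (rowCuts : List Int) (colCuts : List Int) (out : Int × Int) : Decidable (Spec_aPieceOfCake ROW COL positions rowCuts colCuts out) := by unfold Spec_aPieceOfCake; infer_instance

-- ===== CLAIM (what is proved, stated in full; the proofs are below) =====
def Claim_equal_aPieceOfCake : Prop := ∀ (ROW : Int) (COL : Int) (positions : List (Int × Int)) (rowCuts : List Int) (colCuts : List Int), Dom_aPieceOfCake ROW COL positions rowCuts colCuts → Spec_aPieceOfCake ROW COL positions rowCuts colCuts (aPieceOfCake ROW COL positions rowCuts colCuts)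

-- ===== LEMMAS AND PROOFS =====

-- group counts of a sorted list: length of each maximal run of equal elements, in order
def pvGroupCounts : List Int → List Int
  | [] => []
  | x :: t => (1 + (t.count x : Int)) :: pvGroupCounts (t.dropWhile (· == x))
termination_by l => l.length
decreasing_by
  simpa using Nat.lt_succ_of_le (List.length_dropWhile_le (· == x) t)

lemma pv_lt_of_mem_dropWhile (t : List Int) (x : Int) (hs : t.Pairwise (· ≤ ·))
    (hlb : ∀ y ∈ t, x ≤ y) : ∀ k ∈ t.dropWhile (· == x), x < k := by
  induction t with
  | nil => simp
  | cons y t' ih =>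
    by_cases hy : y = x
    · rw [List.dropWhile_cons]
      simp [hy]
      exact fun k hk => ih hs.tail (fun z hz => hlb z (List.mem_cons_of_mem _ hz)) k hk
    · have hxy : x < y :=
        lt_of_le_of_ne (hlb y (List.mem_cons_self)) (fun h => hy h.symm)
      rw [List.dropWhile_cons]
      simp [hy]
      exact ⟨hxy, fun a ha => lt_of_lt_of_le hxy ((List.pairwise_cons.mp hs).1 a ha)⟩

lemma pv_foldl_flush (l : List Int) (cur cnt : Int) (runs : List Int)
    (hs : l.Pairwise (· ≤ ·)) (hlb : ∀ y ∈ l, cur ≤ y) (hc : 0 < cnt) :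
    (let st := l.foldl
      (fun (st : Int × Int × List Int) v =>
        if st.2.1 ≠ 0 ∧ v = st.1 then (st.1, st.2.1 + 1, st.2.2)
        else (v, 1, if st.2.1 ≠ 0 then st.2.2 ++ [st.2.1] else st.2.2))
      (cur, cnt, runs)
     if st.2.1 ≠ 0 then st.2.2 ++ [st.2.1] else st.2.2)
    = runs ++ (cnt + (l.count cur : Int)) :: pvGroupCounts (l.dropWhile (· == cur)) := by
  induction l generalizing cur cnt runs with
  | nil =>
    simp [pvGroupCounts, hc.ne']
  | cons x t ih =>
    by_cases hx : x = cur
    · subst hx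
      rw [List.foldl_cons]
      rw [if_pos (show (x, cnt, runs).2.1 ≠ 0 ∧ x = (x, cnt, runs).1 from ⟨hc.ne', rfl⟩)]
      have := ih x (cnt + 1) runs hs.tail
        (fun z hz => hlb z (List.mem_cons_of_mem _ hz)) (by omega)
      simp only [this]
      rw [List.dropWhile_cons]
      simp [List.count_cons_self]
      ring_nf
    · have hxcur : cur < x :=
        lt_of_le_of_ne (hlb x (List.mem_cons_self)) (fun h => hx h.symm)
      have hnotmem : cur ∉ x :: t := by
        intro hm
        rcases List.mem_cons.mp hm with rfl | hm
        · exact absurd rfl hx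
        · exact absurd ((List.pairwise_cons.mp hs).1 cur hm) (not_le.mpr hxcur)
      rw [List.foldl_cons]
      have hcond : ¬ (cnt ≠ 0 ∧ x = cur) := by
        intro h; exact hx h.2
      rw [if_neg (show ¬ ((cur, cnt, runs).2.1 ≠ 0 ∧ x = (cur, cnt, runs).1) from hcond),
          if_pos (show (cur, cnt, runs).2.1 ≠ 0 from hc.ne')]
      have := ih x 1 (runs ++ [cnt]) hs.tail
        (fun z hz => (List.pairwise_cons.mp hs).1 z hz) one_pos
      simp only [this]
      have hcount : (x :: t).count cur = 0 := List.count_eq_zero.mpr hnotmem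
      rw [List.dropWhile_cons]
      have hbeq : (x == cur) = false := by simp [hx]
      simp [hbeq, pvGroupCounts, hcount]

lemma pv_runLens_eq_groupCounts (l : List Int) (hs : l.Pairwise (· ≤ ·)) :
    pvRunLens l = pvGroupCounts l := by
  cases l with
  | nil => simp [pvRunLens, pvGroupCounts]
  | cons x t =>
    unfold pvRunLens
    rw [List.foldl_cons]
    rw [if_neg (show ¬ (((0:Int), (0:Int), ([] : List Int)).2.1 ≠ 0 ∧ x = ((0:Int), (0:Int), ([] : List Int)).1) from by simp),
        if_neg (show ¬ ((0:Int), (0:Int), ([] : List Int)).2.1 ≠ 0 from by simp)]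
    have := pv_foldl_flush t x 1 [] hs.tail ((List.pairwise_cons.mp hs).1) one_pos
    simp only [this]
    simp [pvGroupCounts]

lemma pv_groupCounts_perm (l : List Int) (hs : l.Pairwise (· ≤ ·)) :
    (pvGroupCounts l).Perm ((PySem.Set.ofList l).map (fun k => (l.count k : Int))) := by
  induction l using pvGroupCounts.induct with
  | case1 => simp [pvGroupCounts]
  | case2 x t ih =>
    have hst : t.Pairwise (· ≤ ·) := hs.tail
    have hlb : ∀ y ∈ t, x ≤ y := (List.pairwise_cons.mp hs).1
    have hr : (t.dropWhile (· == x)).Pairwise (· ≤ ·) :=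
      hst.sublist (List.dropWhile_sublist _)
    have hgt : ∀ k ∈ t.dropWhile (· == x), x < k := pv_lt_of_mem_dropWhile t x hst hlb
    -- counts in t vs counts in the dropped suffix, for k ≠ x
    have hcnt : ∀ k ∈ t.dropWhile (· == x), t.count k = (t.dropWhile (· == x)).count k := by
      intro k hk
      conv_lhs => rw [← List.takeWhile_append_dropWhile (p := (· == x)) (l := t)]
      rw [List.count_append]
      have : (t.takeWhile (· == x)).count k = 0 := by
        rw [List.count_eq_zero]
        intro hm
        have := List.mem_takeWhile_imp hm
        have : k = x := by simpa using this
        exact absurd this (ne_of_gt (hgt k hk))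
      omega
    -- the discarded set is (as a multiset) the set of the dropped suffix
    have hperm : ((PySem.Set.ofList t).discard x).Perm (PySem.Set.ofList (t.dropWhile (· == x))) := by
      apply (List.perm_ext_iff_of_nodup
        (PySem.Set.nodup_discard _ x (PySem.Set.nodup_ofList t))
        (PySem.Set.nodup_ofList _)).mpr
      intro y
      rw [PySem.Set.mem_discard, PySem.Set.mem_ofList, PySem.Set.mem_ofList]
      constructor
      · rintro ⟨hyt, hyx⟩
        conv at hyt => rw [← List.takeWhile_append_dropWhile (p := (· == x)) (l := t)]
        rcases List.mem_append.mp hyt with h | h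
        · exact absurd (by simpa using List.mem_takeWhile_imp h) hyx
        · exact h
      · intro hy
        exact ⟨(List.dropWhile_sublist _).mem hy, ne_of_gt (hgt y hy)⟩
    rw [show pvGroupCounts (x :: t) = (1 + (t.count x : Int)) :: pvGroupCounts (t.dropWhile (· == x)) from by rw [pvGroupCounts]]
    rw [PySem.Set.ofList_cons, List.map_cons]
    have hhead : ((x :: t).count x : Int) = 1 + (t.count x : Int) := by
      rw [List.count_cons_self]; push_cast; ring
    rw [hhead]
    apply List.Perm.cons
    have h1 := ih hr
    have h2 : (PySem.Set.ofList (t.dropWhile (· == x))).map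
          (fun k => ((t.dropWhile (· == x)).count k : Int))
        = (PySem.Set.ofList (t.dropWhile (· == x))).map (fun k => ((x :: t).count k : Int)) := by
      apply List.map_congr_left
      intro k hk
      rw [PySem.Set.mem_ofList] at hk
      rw [List.count_cons_of_ne (ne_of_gt (hgt k hk)).symm, hcnt k hk]
    rw [h2] at h1
    exact h1.trans ((hperm.map (fun k => ((x :: t).count k : Int))).symm)

theorem pv_main (ROW COL : Int) (positions : List (Int × Int)) (rowCuts colCuts : List Int) :
    aPieceOfCake ROW COL positions rowCuts colCuts = aPieceOfCake_alt ROW COL positions rowCuts colCuts := by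
  simp only [aPieceOfCake, aPieceOfCake_alt]
  set rc := PySem.List.sorted rowCuts (fun v => v) with hrc
  set cc := PySem.List.sorted colCuts (fun v => v) with hcc
  set ids := positions.map (fun p : Int × Int =>
    ((PySem.List.bisectLeft rc p.1 : Int)) * (COL + 1) + ((PySem.List.bisectLeft cc p.2 : Int))) with hids
  set s := PySem.List.sorted ids (fun v => v) with hsdef
  have hA : positions.foldl (fun d (p : Int × Int) => d.modify
        (((PySem.List.bisectLeft rc p.1 : Int)) * (COL + 1) + ((PySem.List.bisectLeft cc p.2 : Int))) 0 (· + 1))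
      (PySem.Dict.empty : PySem.Dict Int Int) = PySem.Dict.counter ids := by
    rw [hids, PySem.Dict.counter_eq_foldl, List.foldl_map]
  rw [hA]
  have hsp : s.Pairwise (· ≤ ·) := PySem.List.sorted_pairwise ids (fun v => v)
  have hperm_ids : s.Perm ids := PySem.List.sorted_perm ids (fun v => v) false
  have hvals : (PySem.Dict.counter ids).values
      = (PySem.Set.ofList ids).map (fun k => (ids.count k : Int)) := by
    simp [PySem.Dict.values, PySem.Dict.items_counter, List.map_map, Function.comp]
  have hcntfun : (fun k => ((s.count k : Nat) : Int)) = (fun k => ((ids.count k : Nat) : Int)) :=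
    funext fun k => by rw [hperm_ids.count_eq]
  have hofperm : (PySem.Set.ofList s).Perm (PySem.Set.ofList ids) := by
    apply (List.perm_ext_iff_of_nodup (PySem.Set.nodup_ofList _) (PySem.Set.nodup_ofList _)).mpr
    intro y
    rw [PySem.Set.mem_ofList, PySem.Set.mem_ofList, hperm_ids.mem_iff]
  have hruns : (pvRunLens s).Perm ((PySem.Set.ofList ids).map (fun k => (ids.count k : Int))) := by
    rw [pv_runLens_eq_groupCounts s hsp]
    have h1 := pv_groupCounts_perm s hsp
    rw [hcntfun] at h1
    exact h1.trans (hofperm.map _)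
  have hrc2 : RightCommutative (fun (s : Int × Int) v => (min s.1 v, max s.2 v)) :=
    ⟨fun b a1 a2 => by simp [min_right_comm, max_right_comm]⟩
  have hfold : (PySem.Dict.counter ids).values.foldl (fun (s : Int × Int) v => (min s.1 v, max s.2 v))
        ((1000000000000000000 : Int), (0 : Int))
      = (pvRunLens s).foldl (fun (s : Int × Int) v => (min s.1 v, max s.2 v))
        ((1000000000000000000 : Int), (0 : Int)) := by
    rw [hvals]
    exact (List.Perm.foldl_eq (rcomm := hrc2) hruns _).symm
  have hlen : ((PySem.Dict.counter ids).size : Int) = ((pvRunLens s).length : Int) := by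
    rw [hruns.length_eq, PySem.Dict.size, PySem.Dict.items_counter]
    simp
  rw [hfold, hlen]

-- ===== VERDICT (by name: the statement is the Claim_ definition above) =====
theorem aPieceOfCake_spec : Claim_equal_aPieceOfCake := by
  intro ROW COL positions rowCuts colCuts _
  unfold Spec_aPieceOfCake
  exact pv_main ROW COL positions rowCuts colCuts
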